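-- pv_equiv track=rewrite | github.com/mt-monster/silver-monitor | backtest_5min_analysis.py | bars_to_1s
-- ===== SOURCE A (Python) =====
-- def bars_to_1s(bars: list[dict]) -> list[dict]:
--     """将 tick 序列按 1 秒聚合为 bar（取该秒最后一个价）。"""
--     if not bars:
--         return []
--     grouped = {}
--     for b in bars:
--         sec = b["t"] // 1000
--         grouped[sec] = b  # 后面的覆盖前面的，即取最后一价
--     out = [{"t": sec * 1000, "y": b["y"]} for sec, b in sorted(grouped.items())]
--     return out
-- ===== SOURCE B (Python) =====
-- def bars_to_1s(bars: list[dict]) -> list[dict]: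
--     """Stable-sort the ticks by their second, then emit one bar at each run
--     boundary of the sorted sequence (the run's last element is the input-last
--     tick of that second, matching the dict-overwrite semantics)."""
--     srt = sorted(bars, key=lambda b: b["t"] // 1000)
--     out = []
--     for i, b in enumerate(srt):
--         sec = b["t"] // 1000
--         if i + 1 == len(srt) or srt[i + 1]["t"] // 1000 != sec:
--             out.append({"t": sec * 1000, "y": b["y"]})
--     return out
-- ===== Notes on version B (the rewrite author's own statement) =====
-- stated objective: alternative
-- what changed: Replaces the overwrite-dict grouping plus sort of the items by a stable sort of the ticks by their second followed by a single run-boundary scan that emits the last tick of each same-second run; no grouping dict is maintained.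
import Mathlib
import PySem

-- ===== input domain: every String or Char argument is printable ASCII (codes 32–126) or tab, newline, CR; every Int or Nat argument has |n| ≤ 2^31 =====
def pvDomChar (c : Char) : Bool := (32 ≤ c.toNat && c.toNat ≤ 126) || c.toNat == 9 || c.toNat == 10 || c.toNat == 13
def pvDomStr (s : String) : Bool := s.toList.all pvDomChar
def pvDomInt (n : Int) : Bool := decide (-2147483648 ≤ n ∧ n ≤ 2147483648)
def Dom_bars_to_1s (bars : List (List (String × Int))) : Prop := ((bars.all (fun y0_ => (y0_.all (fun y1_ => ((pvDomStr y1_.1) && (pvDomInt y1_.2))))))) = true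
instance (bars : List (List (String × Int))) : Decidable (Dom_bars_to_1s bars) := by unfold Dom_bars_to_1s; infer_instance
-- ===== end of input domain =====

-- B replaces A's overwrite-dict grouping + item sort by a stable sort by second
-- plus a single run-boundary scan (objective: alternative decomposition, same cost).

-- b["t"] // 1000 ; dict lookup is exact under Pre_ (key "t" present in every bar)
def pvGetSec (b : List (String × Int)) : Int :=
  PySem.Int.floordiv ((PySem.Dict.mk b).getD "t" 0) 1000

-- b["y"] ; exact under Pre_ (key "y" present in every bar)
def pvGetY (b : List (String × Int)) : Int := (PySem.Dict.mk b).getD "y" 0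

-- ===== PORT A =====
def bars_to_1s (bars : List (List (String × Int))) : List (List (String × Int)) :=
  if bars = [] then []
  else
    -- grouped[sec] = b, later bars overwrite earlier ones
    let grouped : PySem.Dict Int (List (String × Int)) :=
      bars.foldl (fun d b => d.insert (pvGetSec b) b) PySem.Dict.empty
    -- sorted(grouped.items()): dict keys are distinct, so Python's tuple
    -- comparison only ever reads the first components — sorting by the key is exact
    (PySem.List.sorted grouped.items (fun p => p.1)).map
      (fun p => [("t", p.1 * 1000), ("y", pvGetY p.2)])

-- ===== PORT B =====
-- the indexed loop 'if i+1 == len(srt) or srt[i+1][t]//1000 != sec: emit' rendered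
-- as structural recursion comparing each element of the sorted list with its successor
def pvRuns : List (List (String × Int)) → List (List (String × Int))
  | [] => []
  | [b] => [[("t", pvGetSec b * 1000), ("y", pvGetY b)]]
  | b :: b' :: rest =>
    if pvGetSec b' ≠ pvGetSec b then
      [("t", pvGetSec b * 1000), ("y", pvGetY b)] :: pvRuns (b' :: rest)
    else pvRuns (b' :: rest)

def bars_to_1s_alt (bars : List (List (String × Int))) : List (List (String × Int)) :=
  pvRuns (PySem.List.sorted bars pvGetSec)

-- ===== PRECONDITION & SPEC =====
-- Exactly the inputs on which A returns: every bar must have key "t" (A reads b["t"]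
-- for every bar, KeyError otherwise), and every bar that is the input-last of its
-- second must have key "y" (A reads "y" only of these surviving group representatives).
-- (The ports are total via getD defaults, and the proved equality holds unconditionally;
-- Pre_ delimits where the ports model the raising Pythons.)
def Pre_bars_to_1s (bars : List (List (String × Int))) : Prop :=
  (∀ b ∈ bars, "t" ∈ b.map Prod.fst) ∧
  ∀ i : Fin bars.length,
    (∀ j : Fin bars.length, i < j → pvGetSec bars[j] ≠ pvGetSec bars[i]) →
    "y" ∈ (bars[i]).map Prod.fst
instance (bars : List (List (String × Int))) : Decidable (Pre_bars_to_1s bars) := by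
  unfold Pre_bars_to_1s; infer_instance

def pvWitness_bars_to_1s : (List (List (String × Int))) :=
  [[("t", 1500), ("y", 3)], [("t", 1700), ("y", 5)], [("t", 300), ("y", 9)]]

def Spec_bars_to_1s (bars : List (List (String × Int))) (out : List (List (String × Int))) : Prop := out = bars_to_1s_alt bars
instance (bars : List (List (String × Int))) (out : List (List (String × Int))) : Decidable (Spec_bars_to_1s bars out) := by unfold Spec_bars_to_1s; infer_instance

-- ===== CLAIM (what is proved, stated in full; the proofs are below) =====
def Claim_equal_bars_to_1s : Prop := ∀ (bars : List (List (String × Int))), Dom_bars_to_1s bars → Pre_bars_to_1s bars → Spec_bars_to_1s bars (bars_to_1s bars)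

-- ===== LEMMAS AND PROOFS =====

-- the common canonical form: over the sorted distinct seconds, emit the last
-- input bar of each second
def pvLast (bars : List (List (String × Int))) (k : Int) : List (String × Int) :=
  (bars.filter (fun b => pvGetSec b == k)).getLastD []

def pvEmit (bars : List (List (String × Int))) (k : Int) : List (String × Int) :=
  [("t", k * 1000), ("y", pvGetY (pvLast bars k))]

def pvCanon (bars : List (List (String × Int))) : List (List (String × Int)) :=
  (PySem.List.sorted (PySem.Set.ofList (bars.map pvGetSec)) (fun x => x)).map (pvEmit bars)

lemma pv_grp_getD (l : List (List (String × Int))) :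
    ∀ (d : PySem.Dict Int (List (String × Int))) (k : Int),
    (l.foldl (fun d b => d.insert (pvGetSec b) b) d).getD k [] =
      (l.filter (fun b => pvGetSec b == k)).getLastD (d.getD k []) := by
  induction l with
  | nil => intro d k; simp
  | cons b t ih =>
    intro d k
    simp only [List.foldl_cons, List.filter_cons]
    rw [ih]
    by_cases hk : pvGetSec b = k
    · rw [if_pos (by simp [hk]), PySem.Dict.getD_insert, if_pos hk.symm, List.getLastD_cons]
    · rw [if_neg (by simp [hk]), PySem.Dict.getD_insert, if_neg (Ne.symm hk)]

lemma pv_sorted_concat (l : List (List (String × Int))) (x : List (String × Int)) :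
    PySem.List.sorted (l ++ [x]) pvGetSec =
      PySem.List.insertBy (fun a b => decide (pvGetSec a < pvGetSec b)) x
        (PySem.List.sorted l pvGetSec) := by
  rw [PySem.List.sorted_eq_foldl_insertBy, PySem.List.sorted_eq_foldl_insertBy,
    List.foldl_append]
  rfl

lemma pv_filter_insertBy (k : Int) (x : List (String × Int)) (ys : List (List (String × Int)))
    (h : ys.Pairwise (fun a b => pvGetSec a ≤ pvGetSec b)) :
    (PySem.List.insertBy (fun a b => decide (pvGetSec a < pvGetSec b)) x ys).filter
        (fun b => pvGetSec b == k) =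
      if pvGetSec x == k then ys.filter (fun b => pvGetSec b == k) ++ [x]
      else ys.filter (fun b => pvGetSec b == k) := by
  induction ys with
  | nil =>
    simp [PySem.List.insertBy, List.filter_cons]
  | cons y t ih =>
    rw [List.pairwise_cons] at h
    simp only [PySem.List.insertBy]
    by_cases hlt : pvGetSec x < pvGetSec y
    · rw [if_pos (by simpa using hlt)]
      -- every element of y :: t has second > pvGetSec x
      have hall : ∀ z ∈ y :: t, pvGetSec x < pvGetSec z := by
        intro z hz
        rcases List.mem_cons.mp hz with rfl | hz
        · exact hlt
        · exact lt_of_lt_of_le hlt (h.1 z hz)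
      by_cases hxk : pvGetSec x = k
      · -- then no element of y :: t matches k
        have hemp : (y :: t).filter (fun b => pvGetSec b == k) = [] := by
          apply List.filter_eq_nil_iff.mpr
          intro z hz
          simp only [beq_iff_eq]
          exact fun hzk => absurd (hxk ▸ hzk ▸ hall z hz) (lt_irrefl _)
        rw [List.filter_cons_of_pos (by simp [hxk]), if_pos (by simp [hxk]), hemp]
        rfl
      · rw [List.filter_cons_of_neg (by simp [hxk]), if_neg (by simp [hxk])]
    · rw [if_neg (by simpa using hlt)]
      rw [List.filter_cons, List.filter_cons, ih h.2]
      by_cases hxk : pvGetSec x = k <;> by_cases hyk : pvGetSec y = k <;>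
        simp [hxk, hyk]

lemma pv_filter_sorted (bars : List (List (String × Int))) (k : Int) :
    (PySem.List.sorted bars pvGetSec).filter (fun b => pvGetSec b == k) =
      bars.filter (fun b => pvGetSec b == k) := by
  induction bars using List.reverseRecOn with
  | nil => rfl
  | append_singleton l x ih =>
    rw [pv_sorted_concat,
      pv_filter_insertBy k x _ (PySem.List.sorted_pairwise l pvGetSec),
      List.filter_append, List.filter_cons, ih]
    by_cases hxk : pvGetSec x = k <;> simp [hxk]

lemma pv_pw_ofList (xs : List Int) (h : xs.Pairwise (· ≤ ·)) :
    (PySem.Set.ofList xs).Pairwise (· < ·) := by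
  induction xs with
  | nil => simp [PySem.Set.ofList]
  | cons x t ih =>
    rw [List.pairwise_cons] at h
    rw [PySem.Set.ofList_cons]
    constructor
    · intro y hy
      simp only [PySem.Set.discard, List.mem_filter, Bool.not_eq_eq_eq_not, Bool.not_true,
        beq_eq_false_iff_ne, ne_eq] at hy
      exact lt_of_le_of_ne (h.1 y ((PySem.Set.mem_ofList _ _).mp hy.1)) (Ne.symm hy.2)
    · exact List.Pairwise.sublist List.filter_sublist (ih h.2)

lemma pv_ofList_cons_cons (x : Int) (l : List Int) :
    PySem.Set.ofList (x :: x :: l) = PySem.Set.ofList (x :: l) := by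
  rw [PySem.Set.ofList_cons, PySem.Set.ofList_cons]
  simp [PySem.Set.discard, List.filter_filter]

lemma pv_ofList_cons_not_mem (x : Int) (l : List Int) (hx : x ∉ l) :
    PySem.Set.ofList (x :: l) = x :: PySem.Set.ofList l := by
  rw [PySem.Set.ofList_cons]
  congr 1
  simp only [PySem.Set.discard]
  apply List.filter_eq_self.mpr
  intro y hy
  simp only [Bool.not_eq_eq_eq_not, Bool.not_true, beq_eq_false_iff_ne, ne_eq]
  exact fun h => hx (h ▸ (PySem.Set.mem_ofList _ _).mp hy)

lemma pv_getLastD_cons_ne_nil {α : Type} (b d : α) (l : List α) (h : l ≠ []) :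
    (b :: l).getLastD d = l.getLastD d := by
  rw [List.getLastD_cons, List.getLastD_eq_getLast?, List.getLastD_eq_getLast?]
  cases hl : l.getLast? with
  | none => exact absurd (List.getLast?_eq_none_iff.mp hl) h
  | some a => rfl

-- dropping the head bar does not change what is emitted for a second that still occurs

lemma pv_emit_cons_of_mem (b : List (String × Int)) (t : List (List (String × Int))) (k : Int)
    (hk : k ∈ t.map pvGetSec) : pvEmit (b :: t) k = pvEmit t k := by
  simp only [pvEmit, pvLast, List.filter_cons]
  by_cases hbk : pvGetSec b = k
  · rw [if_pos (by simp [hbk])]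
    have hft : t.filter (fun z => pvGetSec z == k) ≠ [] := by
      obtain ⟨z, hz, hzk⟩ := List.mem_map.mp hk
      intro hemp
      have := List.filter_eq_nil_iff.mp hemp z hz
      simp [hzk] at this
    rw [pv_getLastD_cons_ne_nil _ _ _ hft]
  · rw [if_neg (by simp [hbk])]

lemma pv_emit_cons_of_ne (b : List (String × Int)) (t : List (List (String × Int))) (k : Int)
    (hbk : pvGetSec b ≠ k) : pvEmit (b :: t) k = pvEmit t k := by
  simp only [pvEmit, pvLast, List.filter_cons]
  rw [if_neg (by simp [hbk])]

lemma pv_emit_head (b : List (String × Int)) (t : List (List (String × Int)))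
    (hall : ∀ z ∈ t, pvGetSec b < pvGetSec z) :
    pvEmit (b :: t) (pvGetSec b) = [("t", pvGetSec b * 1000), ("y", pvGetY b)] := by
  simp only [pvEmit, pvLast, List.filter_cons]
  have hft : t.filter (fun z => pvGetSec z == pvGetSec b) = [] := by
    apply List.filter_eq_nil_iff.mpr
    intro z hz
    simp only [beq_iff_eq]
    exact fun hzk => absurd (hzk ▸ hall z hz) (lt_irrefl _)
  rw [if_pos (by simp), hft]
  rfl

lemma pv_runs_canon (s : List (List (String × Int)))
    (h : s.Pairwise (fun a b => pvGetSec a ≤ pvGetSec b)) :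
    pvRuns s = (PySem.Set.ofList (s.map pvGetSec)).map (pvEmit s) := by
  induction s with
  | nil => rfl
  | cons b t ih =>
    cases t with
    | nil =>
      simp [pvRuns, PySem.Set.ofList, pvEmit, pvLast]
    | cons b' r =>
      rw [List.pairwise_cons] at h
      have hle : pvGetSec b ≤ pvGetSec b' := h.1 b' (List.mem_cons_self ..)
      by_cases heq : pvGetSec b' = pvGetSec b
      · -- same second: b is absorbed into the run
        rw [pvRuns, if_neg (by simp [heq]), ih h.2]
        have hsets : PySem.Set.ofList ((b :: b' :: r).map pvGetSec) =
            PySem.Set.ofList ((b' :: r).map pvGetSec) := by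
          simp only [List.map_cons]
          rw [heq, pv_ofList_cons_cons]
        rw [hsets]
        apply List.map_congr_left
        intro k hk
        exact (pv_emit_cons_of_mem b (b' :: r) k ((PySem.Set.mem_ofList _ _).mp hk)).symm
      · -- strictly smaller second: b closes its run
        have hlt : pvGetSec b < pvGetSec b' := lt_of_le_of_ne hle (Ne.symm heq)
        have hall : ∀ z ∈ b' :: r, pvGetSec b < pvGetSec z := by
          intro z hz
          rcases List.mem_cons.mp hz with rfl | hz
          · exact hlt
          · exact lt_of_lt_of_le hlt ((List.pairwise_cons.mp h.2).1 z hz)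
        have hnm : pvGetSec b ∉ (b' :: r).map pvGetSec := by
          intro hm
          obtain ⟨z, hz, hzk⟩ := List.mem_map.mp hm
          exact absurd (hzk ▸ hall z hz) (lt_irrefl _)
        rw [pvRuns, if_pos (by simp [heq]), ih h.2]
        have hof : PySem.Set.ofList ((b :: b' :: r).map pvGetSec) =
            pvGetSec b :: PySem.Set.ofList ((b' :: r).map pvGetSec) := by
          rw [List.map_cons]
          exact pv_ofList_cons_not_mem _ _ hnm
        rw [hof, List.map_cons]
        congr 1
        · exact (pv_emit_head b (b' :: r) hall).symm
        · apply List.map_congr_left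
          intro k hk
          have hk' : k ∈ (b' :: r).map pvGetSec := (PySem.Set.mem_ofList _ _).mp hk
          exact (pv_emit_cons_of_ne b (b' :: r) k (fun hbk => hnm (hbk ▸ hk'))).symm

lemma pv_A_canon (bars : List (List (String × Int))) : bars_to_1s bars = pvCanon bars := by
  unfold bars_to_1s
  by_cases hb : bars = []
  · subst hb
    show ([] : List (List (String × Int))) = _
    simp [pvCanon]
    rfl
  · rw [if_neg hb]
    show (PySem.List.sorted (bars.foldl (fun d b => d.insert (pvGetSec b) b) PySem.Dict.empty).items (fun p => p.1)).map
      (fun p => [("t", p.1 * 1000), ("y", pvGetY p.2)]) = pvCanon bars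
    set grouped : PySem.Dict Int (List (String × Int)) :=
      bars.foldl (fun d b => d.insert (pvGetSec b) b) PySem.Dict.empty with hgrp
    have hkeys : grouped.keys = PySem.Set.ofList (bars.map pvGetSec) := by
      rw [hgrp, PySem.Dict.keys_foldl_insert_key]
      simp [PySem.Set.update_nil_left]
    have hnd : grouped.keys.Nodup := by
      rw [hgrp]
      exact PySem.Dict.nodup_keys_foldl_insert_key _ _ _ _ (by simp)
    have hitems : grouped.items = grouped.keys.map (fun k => (k, grouped.getD k [])) :=
      PySem.Dict.items_eq_map_keys grouped hnd []
    -- name the sorted order of the items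
    have hsort : PySem.List.sorted grouped.items (fun p => p.1) =
        (PySem.List.sorted grouped.keys (fun x => x)).map (fun k => (k, grouped.getD k [])) := by
      apply PySem.List.sorted_eq_of_perm_of_pairwise_lt
      · rw [hitems]
        exact (PySem.List.sorted_perm grouped.keys (fun x => x) false).map _
      · have := hkeys ▸ PySem.List.sorted_ofList_pairwise_lt (bars.map pvGetSec)
        exact List.Pairwise.map _ (fun a b h => h) this
    rw [hsort, List.map_map, pvCanon, ← hkeys]
    apply List.map_congr_left
    intro k hk
    simp only [Function.comp]
    have : grouped.getD k [] = pvLast bars k := by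
      rw [hgrp, pv_grp_getD]; simp [pvLast]
    rw [this]; rfl

lemma pv_B_canon (bars : List (List (String × Int))) :
    bars_to_1s_alt bars = pvCanon bars := by
  unfold bars_to_1s_alt pvCanon
  set s := PySem.List.sorted bars pvGetSec with hs
  have hpw : s.Pairwise (fun a b => pvGetSec a ≤ pvGetSec b) :=
    PySem.List.sorted_pairwise bars pvGetSec
  rw [pv_runs_canon s hpw]
  have hperm : (s.map pvGetSec).Perm (bars.map pvGetSec) :=
    (PySem.List.sorted_perm bars pvGetSec false).map pvGetSec
  have hset : PySem.List.sorted (PySem.Set.ofList (bars.map pvGetSec)) (fun x => x) =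
      PySem.Set.ofList (s.map pvGetSec) := by
    apply PySem.List.sorted_eq_of_perm_of_pairwise_lt
    · apply (List.perm_ext_iff_of_nodup (PySem.Set.nodup_ofList _)
        (PySem.Set.nodup_ofList _)).mpr
      intro a
      rw [PySem.Set.mem_ofList, PySem.Set.mem_ofList]
      exact ⟨fun ha => hperm.mem_iff.mp ha, fun ha => hperm.mem_iff.mpr ha⟩
    · exact pv_pw_ofList _ (List.pairwise_map.mpr hpw)
  rw [hset]
  apply List.map_congr_left
  intro k _
  simp only [pvEmit, pvLast]
  rw [hs, pv_filter_sorted]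

-- ===== VERDICT (by name: the statement is the Claim_ definition above) =====
theorem bars_to_1s_spec : Claim_equal_bars_to_1s := by
  intro bars _ _
  unfold Spec_bars_to_1s
  rw [pv_A_canon, pv_B_canon]
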